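-- pv_equiv track=rewrite | github.com/AndrewS-hash/pyFiddle | pyFiddle_Intermediate.py | find_max_difference
-- ===== SOURCE A (Python) =====
-- def find_max_difference(binary_string: str) -> int:
--     """
--     Calculate the maximum difference between the number of 0s and 1s in any substring.
--
--     Args:
--         binary_string (str): A string consisting of '0's and '1's.
--
--     Returns:
--         int: The maximum difference between the count of '0's and '1's in any substring.
--     """
--     # Edge case: if the string is empty, the difference is 0
--     if not binary_string:
--         return 0
--
--     # Initialize variables for Kadane's algorithm
--     max_diff = 0  # We start from 0, as the best case when no difference can be negative is 0
--     current_diff = 0  # This will store the current difference as we iterate through the string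
--
--     # Traverse through the binary string
--     for char in binary_string:
--         # Update the difference: +1 for '0', -1 for '1'
--         current_diff += 1 if char == '0' else -1
--
--         # Update the max_diff with the largest difference encountered
--         max_diff = max(max_diff, current_diff)
--
--         # If current_diff goes negative, reset it to 0 (start a new subarray)
--         if current_diff < 0:
--             current_diff = 0
--
--     return max_diff
-- ===== SOURCE B (Python) =====
-- def find_max_difference(binary_string: str) -> int:
--     """Prefix-sum / running-minimum scan: best = max over i<=j of (prefix[j] - prefix[i])."""
--     best = 0
--     running = 0
--     min_prefix = 0
--     for char in binary_string:
--         running += 1 if char == '0' else -1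
--         best = max(best, running - min_prefix)
--         min_prefix = min(min_prefix, running)
--     return best
-- ===== Notes on version B (the rewrite author's own statement) =====
-- stated objective: alternative
-- what changed: Replaces Kadane's reset-at-negative running accumulator with a prefix-sum scan that tracks the running minimum prefix sum and takes best = max(running - min_prefix).
import Mathlib
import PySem

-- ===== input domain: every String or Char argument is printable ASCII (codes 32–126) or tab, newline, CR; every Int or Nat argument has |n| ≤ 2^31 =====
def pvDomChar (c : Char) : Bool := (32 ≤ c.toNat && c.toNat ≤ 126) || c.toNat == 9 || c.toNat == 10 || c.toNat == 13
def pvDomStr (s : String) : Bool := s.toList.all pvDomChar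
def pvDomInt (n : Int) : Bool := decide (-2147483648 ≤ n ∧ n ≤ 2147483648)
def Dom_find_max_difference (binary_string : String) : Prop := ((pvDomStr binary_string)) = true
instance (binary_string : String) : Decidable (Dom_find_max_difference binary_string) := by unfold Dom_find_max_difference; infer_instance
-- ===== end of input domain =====

-- B replaces A's Kadane reset-at-negative accumulator by a prefix-sum / running-minimum scan (alternative decomposition, same cost).

-- ===== PORT A =====
-- Kadane loop: state (max_diff, current_diff); update max first, then reset current if negative.
def pvLoopA : List Char → Int → Int → Int
  | [], max_diff, _ => max_diff
  | c :: rest, max_diff, current_diff =>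
      let cd := current_diff + (if c = '0' then 1 else -1)
      let md := max max_diff cd
      pvLoopA rest md (if cd < 0 then 0 else cd)

def find_max_difference (binary_string : String) : Int :=
  if binary_string = "" then 0
  else pvLoopA binary_string.toList 0 0

-- ===== PORT B =====
-- Prefix-sum scan: state (best, running, min_prefix); best = max(best, running - min_prefix), then min_prefix = min(min_prefix, running).
def pvLoopB : List Char → Int → Int → Int → Int
  | [], best, _, _ => best
  | c :: rest, best, running, min_prefix =>
      let r := running + (if c = '0' then 1 else -1)
      pvLoopB rest (max best (r - min_prefix)) r (min min_prefix r)

def find_max_difference_alt (binary_string : String) : Int :=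
  pvLoopB binary_string.toList 0 0 0

-- ===== PRECONDITION & SPEC =====
def Spec_find_max_difference (binary_string : String) (out : Int) : Prop := out = find_max_difference_alt binary_string
instance (binary_string : String) (out : Int) : Decidable (Spec_find_max_difference binary_string out) := by unfold Spec_find_max_difference; infer_instance

-- ===== CLAIM (what is proved, stated in full; the proofs are below) =====
def Claim_equal_find_max_difference : Prop := ∀ (binary_string : String), Dom_find_max_difference binary_string → Spec_find_max_difference binary_string (find_max_difference binary_string)

-- ===== LEMMAS AND PROOFS =====
-- Invariant: with mn ≤ run, Kadane's current accumulator equals run - mn and both maxima coincide.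
theorem pvLoop_eq (l : List Char) : ∀ (run mn md : Int), mn ≤ run →
    pvLoopA l md (run - mn) = pvLoopB l md run mn := by
  induction l with
  | nil => intro run mn md _; simp [pvLoopA, pvLoopB]
  | cons c rest ih =>
      intro run mn md h
      simp only [pvLoopA, pvLoopB]
      generalize (if c = '0' then (1 : Int) else -1) = d
      rw [show run - mn + d = run + d - mn from by ring]
      by_cases hlt : run + d - mn < 0
      · rw [if_pos hlt, min_eq_right (by omega : run + d ≤ mn),
            show (0 : Int) = run + d - (run + d) from by ring]
        exact ih _ _ _ le_rfl
      · rw [if_neg hlt, min_eq_left (by omega : mn ≤ run + d)]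
        exact ih _ _ _ (by omega)

-- ===== VERDICT (by name: the statement is the Claim_ definition above) =====
theorem find_max_difference_spec : Claim_equal_find_max_difference := by
  intro s _
  unfold Spec_find_max_difference find_max_difference find_max_difference_alt
  by_cases hs : s = ""
  · subst hs; simp [pvLoopB]
  · simp only [if_neg hs]
    simpa using pvLoop_eq s.toList 0 0 0 le_rfl
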